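-- pv_equiv track=rewrite | github.com/kkyyds1/HIT | utils.py | define_LRH
-- ===== SOURCE A (Python) =====
-- def define_LRH(H, R, V, I, N, hoist_length, max_tank, min_tank, max_hoist_num, H_Interval):
--     LH = {}
--     RH = {}
--
--     for r in R:
--         for i in range(I[r], N[r]):
--             LH[r, i] = max_hoist_num
--             RH[r, i] = 1
--             for hindex, hinterval in enumerate(H_Interval):
--                 if V[r, i] in hinterval and V[r, i + 1] in hinterval:
--                     if LH[r, i] > hindex + 1:
--                         LH[r, i] = hindex + 1
--                     if RH[r, i] < hindex + 1:
--                         RH[r, i] = hindex + 1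
--             if RH[r, i] < LH[r, i]:
--                 RH[r, i] = LH[r, i]
--     return LH, RH
-- ===== SOURCE B (Python) =====
-- def define_LRH(H, R, V, I, N, hoist_length, max_tank, min_tank, max_hoist_num, H_Interval):
--     LH, RH = {}, {}
--     for r in R:
--         for i in range(I[r], N[r]):
--             first = next((h for h, iv in enumerate(H_Interval)
--                           if V[r, i] in iv and V[r, i + 1] in iv), None)
--             if first is None:
--                 lh, rh = max_hoist_num, max(1, max_hoist_num)
--             else:
--                 last = next(h for h, iv in reversed(list(enumerate(H_Interval)))
--                             if V[r, i] in iv and V[r, i + 1] in iv)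
--                 lh = min(max_hoist_num, first + 1)
--                 rh = max(1, last + 1, lh)
--             LH[r, i] = lh
--             RH[r, i] = rh
--     return LH, RH
-- ===== Notes on version B (the rewrite author's own statement) =====
-- stated objective: alternative
-- what changed: Per cell, A scans all intervals maintaining running-min/running-max dict entries and applies a final clamp; B instead computes the first and the last qualifying interval by two early-exit searches (forward and backward) and derives LH/RH by direct min/max arithmetic, inserting each dict entry exactly once.
import Mathlib
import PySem

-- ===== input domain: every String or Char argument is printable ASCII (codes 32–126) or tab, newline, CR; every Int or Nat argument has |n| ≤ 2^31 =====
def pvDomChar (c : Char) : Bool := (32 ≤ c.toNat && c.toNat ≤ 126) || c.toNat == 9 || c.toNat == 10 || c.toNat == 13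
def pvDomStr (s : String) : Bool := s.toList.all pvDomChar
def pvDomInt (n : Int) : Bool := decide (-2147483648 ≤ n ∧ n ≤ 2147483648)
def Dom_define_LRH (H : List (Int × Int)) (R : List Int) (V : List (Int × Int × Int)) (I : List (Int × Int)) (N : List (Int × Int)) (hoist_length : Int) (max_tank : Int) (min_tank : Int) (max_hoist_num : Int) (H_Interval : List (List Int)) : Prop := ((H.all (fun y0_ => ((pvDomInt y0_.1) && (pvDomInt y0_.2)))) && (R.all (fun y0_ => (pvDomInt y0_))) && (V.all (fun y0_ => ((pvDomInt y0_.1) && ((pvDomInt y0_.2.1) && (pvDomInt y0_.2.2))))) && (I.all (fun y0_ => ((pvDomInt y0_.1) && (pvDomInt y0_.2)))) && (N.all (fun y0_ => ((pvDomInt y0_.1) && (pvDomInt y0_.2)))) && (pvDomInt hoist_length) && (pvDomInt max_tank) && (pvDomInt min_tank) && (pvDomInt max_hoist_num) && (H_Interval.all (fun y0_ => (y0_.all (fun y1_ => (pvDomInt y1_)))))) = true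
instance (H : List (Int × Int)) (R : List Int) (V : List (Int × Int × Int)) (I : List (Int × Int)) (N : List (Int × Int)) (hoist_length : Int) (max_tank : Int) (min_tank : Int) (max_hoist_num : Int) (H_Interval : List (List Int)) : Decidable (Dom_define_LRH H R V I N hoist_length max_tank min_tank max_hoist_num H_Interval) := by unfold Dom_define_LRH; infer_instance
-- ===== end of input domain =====

-- B computes each cell's LH/RH from the first and last qualifying interval (two early-exit
-- searches, V read only inside them) instead of A's full accumulator scan; equivalence is
-- about the return value only.

-- dict lookup d[r] (LAST binding wins, as in a Python dict built by repeated assignment; default 0 is never reached inside Pre_)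
def pvGet1 (d : List (Int × Int)) (r : Int) : Int :=
  ((d.reverse.find? (fun p => p.1 == r)).map (·.2)).getD 0

-- dict lookup d[(r, i)] (default 0 never reached inside Pre_; with H_Interval = [] the
-- looked-up value is never used by either port)
def pvGet2 (d : List (Int × Int × Int)) (r i : Int) : Int :=
  ((d.reverse.find? (fun t => t.1 == r && t.2.1 == i)).map (·.2.2)).getD 0

-- ===== PORT A =====
def define_LRH (H : List (Int × Int)) (R : List Int) (V : List (Int × Int × Int)) (I : List (Int × Int)) (N : List (Int × Int)) (hoist_length : Int) (max_tank : Int) (min_tank : Int) (max_hoist_num : Int) (H_Interval : List (List Int)) : (List (Int × Int × Int)) × (List (Int × Int × Int)) :=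
  let res : PySem.Dict (Int × Int) Int × PySem.Dict (Int × Int) Int :=
    R.foldl (fun st r =>
      (PySem.List.pyRange (pvGet1 I r) (pvGet1 N r) 1).foldl (fun st i =>
        let st := (st.1.insert (r, i) max_hoist_num, st.2.insert (r, i) 1)
        let st := (PySem.List.enumerate H_Interval 0).foldl (fun st hi =>
          if pvGet2 V r i ∈ hi.2 ∧ pvGet2 V r (i + 1) ∈ hi.2 then
            let st := if st.1.getD (r, i) 0 > hi.1 + 1 then (st.1.insert (r, i) (hi.1 + 1), st.2) else st
            if st.2.getD (r, i) 0 < hi.1 + 1 then (st.1, st.2.insert (r, i) (hi.1 + 1)) else st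
          else st) st
        if st.2.getD (r, i) 0 < st.1.getD (r, i) 0 then (st.1, st.2.insert (r, i) (st.1.getD (r, i) 0)) else st) st)
      (PySem.Dict.empty, PySem.Dict.empty)
  (res.1.items.map (fun p => (p.1.1, p.1.2, p.2)), res.2.items.map (fun p => (p.1.1, p.1.2, p.2)))

-- ===== PORT B =====
-- first/last qualifying interval; the backward search's default is never reached (a forward match exists)
def altBounds (H_Interval : List (List Int)) (max_hoist_num a b : Int) : Int × Int :=
  match (PySem.List.enumerate H_Interval 0).find? (fun hi => decide (a ∈ hi.2) && decide (b ∈ hi.2)) with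
  | none => (max_hoist_num, max 1 max_hoist_num)
  | some p =>
      let last := (((PySem.List.enumerate H_Interval 0).reverse.find? (fun hi => decide (a ∈ hi.2) && decide (b ∈ hi.2))).map (·.1)).getD 0
      let lh := min max_hoist_num (p.1 + 1)
      (lh, max (max 1 (last + 1)) lh)

def define_LRH_alt (H : List (Int × Int)) (R : List Int) (V : List (Int × Int × Int)) (I : List (Int × Int)) (N : List (Int × Int)) (hoist_length : Int) (max_tank : Int) (min_tank : Int) (max_hoist_num : Int) (H_Interval : List (List Int)) : (List (Int × Int × Int)) × (List (Int × Int × Int)) :=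
  let res : PySem.Dict (Int × Int) Int × PySem.Dict (Int × Int) Int :=
    R.foldl (fun st r =>
      (PySem.List.pyRange (pvGet1 I r) (pvGet1 N r) 1).foldl (fun st i =>
        let lr := altBounds H_Interval max_hoist_num (pvGet2 V r i) (pvGet2 V r (i + 1))
        (st.1.insert (r, i) lr.1, st.2.insert (r, i) lr.2)) st)
      (PySem.Dict.empty, PySem.Dict.empty)
  (res.1.items.map (fun p => (p.1.1, p.1.2, p.2)), res.2.items.map (fun p => (p.1.1, p.1.2, p.2)))

-- ===== PRECONDITION & SPEC =====
-- Pre_ excludes exactly the inputs on which A raises KeyError: some r in R missing from I or N,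
-- or, when H_Interval is nonempty, a visited cell whose V[r,i] or V[r,i+1] entry is missing
-- (with H_Interval empty neither program reads V, and both return the defaults). Pre_ is
-- slightly narrower than A's exact domain: it requires both V entries even where Python's
-- short-circuit `and` would skip V[r,i+1]; A and B agree there too (see the cite).
def Pre_define_LRH (H : List (Int × Int)) (R : List Int) (V : List (Int × Int × Int)) (I : List (Int × Int)) (N : List (Int × Int)) (hoist_length : Int) (max_tank : Int) (min_tank : Int) (max_hoist_num : Int) (H_Interval : List (List Int)) : Prop :=
  ∀ r ∈ R, (I.find? (fun p => p.1 == r)).isSome ∧ (N.find? (fun p => p.1 == r)).isSome ∧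
    (H_Interval ≠ [] → ∀ i ∈ PySem.List.pyRange (pvGet1 I r) (pvGet1 N r) 1,
      (V.find? (fun t => t.1 == r && t.2.1 == i)).isSome ∧
      (V.find? (fun t => t.1 == r && t.2.1 == i + 1)).isSome)
instance (H : List (Int × Int)) (R : List Int) (V : List (Int × Int × Int)) (I : List (Int × Int)) (N : List (Int × Int)) (hoist_length : Int) (max_tank : Int) (min_tank : Int) (max_hoist_num : Int) (H_Interval : List (List Int)) : Decidable (Pre_define_LRH H R V I N hoist_length max_tank min_tank max_hoist_num H_Interval) := by unfold Pre_define_LRH; infer_instance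

def pvWitness_define_LRH : (List (Int × Int)) × List Int × (List (Int × Int × Int)) × (List (Int × Int)) × (List (Int × Int)) × Int × Int × Int × Int × List (List Int) :=
  ([], [0], [(0, 0, 5), (0, 1, 5)], [(0, 0)], [(0, 1)], 0, 0, 0, 3, [[5], [5, 6]])

def Spec_define_LRH (H : List (Int × Int)) (R : List Int) (V : List (Int × Int × Int)) (I : List (Int × Int)) (N : List (Int × Int)) (hoist_length : Int) (max_tank : Int) (min_tank : Int) (max_hoist_num : Int) (H_Interval : List (List Int)) (out : (List (Int × Int × Int)) × (List (Int × Int × Int))) : Prop := out = define_LRH_alt H R V I N hoist_length max_tank min_tank max_hoist_num H_Interval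
instance (H : List (Int × Int)) (R : List Int) (V : List (Int × Int × Int)) (I : List (Int × Int)) (N : List (Int × Int)) (hoist_length : Int) (max_tank : Int) (min_tank : Int) (max_hoist_num : Int) (H_Interval : List (List Int)) (out : (List (Int × Int × Int)) × (List (Int × Int × Int))) : Decidable (Spec_define_LRH H R V I N hoist_length max_tank min_tank max_hoist_num H_Interval out) := by unfold Spec_define_LRH; infer_instance

-- ===== CLAIM (what is proved, stated in full; the proofs are below) =====
def Claim_equal_define_LRH : Prop := ∀ (H : List (Int × Int)) (R : List Int) (V : List (Int × Int × Int)) (I : List (Int × Int)) (N : List (Int × Int)) (hoist_length : Int) (max_tank : Int) (min_tank : Int) (max_hoist_num : Int) (H_Interval : List (List Int)), Dom_define_LRH H R V I N hoist_length max_tank min_tank max_hoist_num H_Interval → Pre_define_LRH H R V I N hoist_length max_tank min_tank max_hoist_num H_Interval → Spec_define_LRH H R V I N hoist_length max_tank min_tank max_hoist_num H_Interval (define_LRH H R V I N hoist_length max_tank min_tank max_hoist_num H_Interval)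

-- ===== LEMMAS AND PROOFS =====

-- A's inner dict-updating fold tracked as two pure scalar folds on the (r, i) entries
theorem a_inner_fold (l : List (Int × List Int)) (a b : Int) (k : Int × Int)
    (d1 d2 : PySem.Dict (Int × Int) Int) (x y : Int) :
    l.foldl (fun st hi =>
        if a ∈ hi.2 ∧ b ∈ hi.2 then
          let st := if st.1.getD k 0 > hi.1 + 1 then (st.1.insert k (hi.1 + 1), st.2) else st
          if st.2.getD k 0 < hi.1 + 1 then (st.1, st.2.insert k (hi.1 + 1)) else st
        else st) (d1.insert k x, d2.insert k y)
    = (d1.insert k (l.foldl (fun u hi => if a ∈ hi.2 ∧ b ∈ hi.2 then (if u > hi.1 + 1 then hi.1 + 1 else u) else u) x),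
       d2.insert k (l.foldl (fun u hi => if a ∈ hi.2 ∧ b ∈ hi.2 then (if u < hi.1 + 1 then hi.1 + 1 else u) else u) y)) := by
  induction l generalizing d1 d2 x y with
  | nil => rfl
  | cons hd tl ih =>
      simp only [List.foldl_cons]
      by_cases hP : a ∈ hd.2 ∧ b ∈ hd.2
      · simp only [if_pos hP, PySem.Dict.getD_insert_self]
        by_cases h1 : x > hd.1 + 1
        · simp only [if_pos h1, PySem.Dict.getD_insert_self, PySem.Dict.insert_insert_self]
          by_cases h2 : y < hd.1 + 1
          · simp only [if_pos h2, ih]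
          · simp only [if_neg h2, ih]
        · simp only [if_neg h1, PySem.Dict.getD_insert_self]
          by_cases h2 : y < hd.1 + 1
          · simp only [if_pos h2, PySem.Dict.insert_insert_self, ih]
          · simp only [if_neg h2, ih]
      · simp only [if_neg hP, ih]

-- the running-min fold equals min with the FIRST match (indices strictly increasing)
theorem foldl_min_first (a b : Int) (l : List (Int × List Int))
    (hl : l.Pairwise (fun p q => p.1 < q.1)) (x : Int) :
    l.foldl (fun u hi => if a ∈ hi.2 ∧ b ∈ hi.2 then (if u > hi.1 + 1 then hi.1 + 1 else u) else u) x
    = match l.find? (fun hi => decide (a ∈ hi.2) && decide (b ∈ hi.2)) with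
      | none => x
      | some p => min x (p.1 + 1) := by
  induction l generalizing x with
  | nil => rfl
  | cons hd tl ih =>
      have htl := (List.pairwise_cons.mp hl).2
      have hhd := (List.pairwise_cons.mp hl).1
      simp only [List.foldl_cons]
      by_cases hP : a ∈ hd.2 ∧ b ∈ hd.2
      · have hb : (decide (a ∈ hd.2) && decide (b ∈ hd.2)) = true := by
          simp [hP.1, hP.2]
        rw [if_pos hP, ih htl]
        simp only [List.find?_cons, hb]
        rcases hfind : tl.find? (fun hi => decide (a ∈ hi.2) && decide (b ∈ hi.2)) with _ | p
        · simp only [hfind]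
          simp only [Int.min_def]; split_ifs <;> first | rfl | linarith
        · simp only [hfind]
          have hlt : hd.1 < p.1 := hhd p (List.mem_of_find?_eq_some hfind)
          simp only [Int.min_def]; split_ifs <;> first | rfl | linarith
      · have hb : (decide (a ∈ hd.2) && decide (b ∈ hd.2)) = false := by
          rcases Decidable.not_and_iff_not_or_not.mp hP with h | h <;> simp [h]
        rw [if_neg hP, ih htl]
        simp only [List.find?_cons, hb]

theorem foldl_max_last (a b : Int) (l : List (Int × List Int))
    (hl : l.Pairwise (fun p q => p.1 < q.1)) (y : Int) :
    l.foldl (fun u hi => if a ∈ hi.2 ∧ b ∈ hi.2 then (if u < hi.1 + 1 then hi.1 + 1 else u) else u) y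
    = match l.reverse.find? (fun hi => decide (a ∈ hi.2) && decide (b ∈ hi.2)) with
      | none => y
      | some p => max y (p.1 + 1) := by
  induction l generalizing y with
  | nil => rfl
  | cons hd tl ih =>
      have htl := (List.pairwise_cons.mp hl).2
      have hhd := (List.pairwise_cons.mp hl).1
      simp only [List.foldl_cons, List.reverse_cons, List.find?_append]
      by_cases hP : a ∈ hd.2 ∧ b ∈ hd.2
      · have hb : (decide (a ∈ hd.2) && decide (b ∈ hd.2)) = true := by
          simp [hP.1, hP.2]
        rw [if_pos hP, ih htl]
        simp only [List.find?_cons, hb]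
        rcases hfind : tl.reverse.find? (fun hi => decide (a ∈ hi.2) && decide (b ∈ hi.2)) with _ | p
        · simp only [hfind, Option.none_or]
          simp only [Int.max_def]; split_ifs <;> first | rfl | linarith
        · simp only [hfind, Option.some_or]
          have hlt : hd.1 < p.1 := hhd p (List.mem_reverse.mp (List.mem_of_find?_eq_some hfind))
          simp only [Int.max_def]; split_ifs <;> first | rfl | linarith
      · have hb : (decide (a ∈ hd.2) && decide (b ∈ hd.2)) = false := by
          rcases Decidable.not_and_iff_not_or_not.mp hP with h | h <;> simp [h]
        rw [if_neg hP, ih htl]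
        simp only [List.find?_cons, List.find?_nil, hb, Option.or_none]

-- clamping RH up to LH is taking a max
theorem clamp_pair (d1 d2 : PySem.Dict (Int × Int) Int) (k : Int × Int) (L Rv : Int) :
    (if Rv < L then (d1.insert k L, (d2.insert k Rv).insert k L) else (d1.insert k L, d2.insert k Rv))
    = (d1.insert k L, d2.insert k (max Rv L)) := by
  rw [Int.max_def]
  split_ifs with h h2
  · rw [PySem.Dict.insert_insert_self]
  · exact absurd h.le h2
  · rename_i h2
    rw [le_antisymm h2 (not_lt.mp h)]
  · rfl

-- A's whole per-cell step equals a single insertion of altBounds into each dict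
theorem cell_eq (HI : List (List Int)) (mhn a b : Int) (k : Int × Int)
    (d : PySem.Dict (Int × Int) Int × PySem.Dict (Int × Int) Int) :
    (let st := (d.1.insert k mhn, d.2.insert k 1)
     let st := (PySem.List.enumerate HI 0).foldl (fun st hi =>
        if a ∈ hi.2 ∧ b ∈ hi.2 then
          let st := if st.1.getD k 0 > hi.1 + 1 then (st.1.insert k (hi.1 + 1), st.2) else st
          if st.2.getD k 0 < hi.1 + 1 then (st.1, st.2.insert k (hi.1 + 1)) else st
        else st) st
     if st.2.getD k 0 < st.1.getD k 0 then (st.1, st.2.insert k (st.1.getD k 0)) else st)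
    = (d.1.insert k (altBounds HI mhn a b).1, d.2.insert k (altBounds HI mhn a b).2) := by
  have hpw : (PySem.List.enumerate HI 0).Pairwise (fun p q => p.1 < q.1) :=
    PySem.List.pairwise_lt_enumerate HI 0
  simp only [a_inner_fold, foldl_min_first a b _ hpw, foldl_max_last a b _ hpw,
    PySem.Dict.getD_insert_self]
  rcases hfind : (PySem.List.enumerate HI 0).find? (fun hi => decide (a ∈ hi.2) && decide (b ∈ hi.2)) with _ | p
  · have hrev : (PySem.List.enumerate HI 0).reverse.find? (fun hi => decide (a ∈ hi.2) && decide (b ∈ hi.2)) = none := by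
      rw [List.find?_eq_none] at hfind ⊢
      intro x hx
      exact hfind x (List.mem_reverse.mp hx)
    simp only [hfind, hrev, altBounds]
    exact clamp_pair d.1 d.2 k mhn 1
  · rcases hrev : (PySem.List.enumerate HI 0).reverse.find? (fun hi => decide (a ∈ hi.2) && decide (b ∈ hi.2)) with _ | q
    · exfalso
      rw [List.find?_eq_none] at hrev
      exact absurd (List.find?_some hfind)
        (by simpa using hrev p (List.mem_reverse.mpr (List.mem_of_find?_eq_some hfind)))
    · simp only [hfind, hrev, altBounds, Option.map_some, Option.getD_some]
      exact clamp_pair d.1 d.2 k (min mhn (p.1 + 1)) (max 1 (q.1 + 1))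

-- ===== VERDICT (by name: the statement is the Claim_ definition above) =====
theorem define_LRH_spec : Claim_equal_define_LRH := by
  intro H R V I N hoist_length max_tank min_tank max_hoist_num H_Interval _ _
  unfold Spec_define_LRH
  unfold define_LRH define_LRH_alt
  have hstep : ∀ (st : PySem.Dict (Int × Int) Int × PySem.Dict (Int × Int) Int) (r i : Int),
      (let st' := (st.1.insert (r, i) max_hoist_num, st.2.insert (r, i) 1)
       let st'' := (PySem.List.enumerate H_Interval 0).foldl (fun st hi =>
          if pvGet2 V r i ∈ hi.2 ∧ pvGet2 V r (i + 1) ∈ hi.2 then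
            let st := if st.1.getD (r, i) 0 > hi.1 + 1 then (st.1.insert (r, i) (hi.1 + 1), st.2) else st
            if st.2.getD (r, i) 0 < hi.1 + 1 then (st.1, st.2.insert (r, i) (hi.1 + 1)) else st
          else st) st'
       if st''.2.getD (r, i) 0 < st''.1.getD (r, i) 0 then (st''.1, st''.2.insert (r, i) (st''.1.getD (r, i) 0)) else st'')
      = (let lr := altBounds H_Interval max_hoist_num (pvGet2 V r i) (pvGet2 V r (i + 1))
         (st.1.insert (r, i) lr.1, st.2.insert (r, i) lr.2)) := by
    intro st r i
    exact cell_eq H_Interval max_hoist_num (pvGet2 V r i) (pvGet2 V r (i + 1)) (r, i) st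
  simp only [hstep]
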